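-- pv_equiv track=rewrite | github.com/novdex/bob-agent | mind-clone/scripts/bob_log.py | generate_changes_list
-- ===== SOURCE A (Python) =====
-- def categorize_files(files):
--     """Group files by area."""
--     areas = {
--         "modular": [],
--         "frontend": [],
--         "tests": [],
--         "scripts": [],
--         "config": [],
--         "docs": [],
--         "other": [],
--     }
--     for f in files:
--         if f.startswith("src/mind_clone/") or f.startswith("src\\mind_clone\\"):
--             areas["modular"].append(f)
--         elif "mind-clone-ui" in f:
--             areas["frontend"].append(f)
--         elif f.startswith("tests/") or f.startswith("tests\\"):
--             areas["tests"].append(f)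
--         elif "scripts/" in f or "scripts\\" in f:
--             areas["scripts"].append(f)
--         elif f.endswith((".toml", ".yml", ".yaml", ".json", ".cfg", "Dockerfile")):
--             areas["config"].append(f)
--         elif f.endswith(".md"):
--             areas["docs"].append(f)
--         else:
--             areas["other"].append(f)
--     return {k: v for k, v in areas.items() if v}
--
-- def generate_changes_list(files):
--     """Generate numbered changes list from files."""
--     areas = categorize_files(files)
--     items = []
--     idx = 1
--     for area, area_files in areas.items():
--         for f in area_files:
--             items.append(f"{idx}. Modified `{f}`")
--             idx += 1
--     return "\n".join(items) if items else "1. (No file changes detected)"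
-- ===== SOURCE B (Python) =====
-- def generate_changes_list(files):
--     """Generate numbered changes list from files."""
--     def category(f):
--         if f.startswith("src/mind_clone/") or f.startswith("src\\mind_clone\\"):
--             return 0
--         if "mind-clone-ui" in f:
--             return 1
--         if f.startswith("tests/") or f.startswith("tests\\"):
--             return 2
--         if "scripts/" in f or "scripts\\" in f:
--             return 3
--         if f.endswith((".toml", ".yml", ".yaml", ".json", ".cfg", "Dockerfile")):
--             return 4
--         if f.endswith(".md"):
--             return 5
--         return 6
--     ordered = [f for k in range(7) for f in files if category(f) == k]
--     if not ordered:
--         return "1. (No file changes detected)"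
--     return "\n".join(f"{i}. Modified `{f}`" for i, f in enumerate(ordered, 1))
-- ===== Notes on version B (the rewrite author's own statement) =====
-- stated objective: simpler
-- what changed: Replaces the seven-bucket dict accumulation plus dict-iteration numbering loop with a category-priority function, a single flat comprehension collecting files per category in priority order, and enumerate-based formatting.
import Mathlib
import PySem

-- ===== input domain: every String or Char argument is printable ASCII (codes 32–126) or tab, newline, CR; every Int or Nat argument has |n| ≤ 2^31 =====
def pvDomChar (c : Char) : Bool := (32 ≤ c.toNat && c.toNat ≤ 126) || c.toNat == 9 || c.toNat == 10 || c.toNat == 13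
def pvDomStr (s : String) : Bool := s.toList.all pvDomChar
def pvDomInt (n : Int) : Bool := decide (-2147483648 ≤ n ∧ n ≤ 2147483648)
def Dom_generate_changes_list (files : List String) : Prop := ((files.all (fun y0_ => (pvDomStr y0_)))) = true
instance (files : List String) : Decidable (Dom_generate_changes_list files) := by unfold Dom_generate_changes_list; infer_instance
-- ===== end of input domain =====

-- B replaces A's seven-bucket dict accumulation and counter loop by a category-priority
-- function, one flat per-category collection pass and enumerate-based formatting (objective: simpler).

-- ===== PORT A =====
-- A's dict `areas` has seven FIXED literal keys in fixed insertion order and is only ever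
-- appended to at those keys; it is ported exactly as a seven-field record (insertion order
-- of the keys is materialised in categorize_files's result list below).
structure PVAreas where
  modular : List String
  frontend : List String
  tests : List String
  scripts : List String
  config : List String
  docs : List String
  other : List String

def pvAreasStep (a : PVAreas) (f : String) : PVAreas :=
  if PySem.Str.startswith f "src/mind_clone/" || PySem.Str.startswith f "src\\mind_clone\\" then
    { a with modular := a.modular ++ [f] }
  else if PySem.Str.isIn "mind-clone-ui" f then
    { a with frontend := a.frontend ++ [f] }
  else if PySem.Str.startswith f "tests/" || PySem.Str.startswith f "tests\\" then
    { a with tests := a.tests ++ [f] }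
  else if PySem.Str.isIn "scripts/" f || PySem.Str.isIn "scripts\\" f then
    { a with scripts := a.scripts ++ [f] }
  else if PySem.Str.endswith f ".toml" || PySem.Str.endswith f ".yml" ||
          PySem.Str.endswith f ".yaml" || PySem.Str.endswith f ".json" ||
          PySem.Str.endswith f ".cfg" || PySem.Str.endswith f "Dockerfile" then
    { a with config := a.config ++ [f] }
  else if PySem.Str.endswith f ".md" then
    { a with docs := a.docs ++ [f] }
  else
    { a with other := a.other ++ [f] }

def categorize_files (files : List String) : List (String × List String) :=
  let areas := files.foldl pvAreasStep ⟨[], [], [], [], [], [], []⟩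
  ([("modular", areas.modular), ("frontend", areas.frontend), ("tests", areas.tests),
    ("scripts", areas.scripts), ("config", areas.config), ("docs", areas.docs),
    ("other", areas.other)]).filter (fun p => !p.2.isEmpty)

def generate_changes_list (files : List String) : String :=
  let areas := categorize_files files
  let st := areas.foldl
    (fun (st : List String × Int) p =>
      p.2.foldl
        (fun (st : List String × Int) f =>
          (st.1 ++ [PySem.Int.toStr st.2 ++ ". Modified `" ++ f ++ "`"], st.2 + 1))
        st)
    ([], 1)
  if st.1.isEmpty then "1. (No file changes detected)" else PySem.Str.join "\n" st.1

-- ===== PORT B =====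
def pvCategory (f : String) : Int :=
  if PySem.Str.startswith f "src/mind_clone/" || PySem.Str.startswith f "src\\mind_clone\\" then 0
  else if PySem.Str.isIn "mind-clone-ui" f then 1
  else if PySem.Str.startswith f "tests/" || PySem.Str.startswith f "tests\\" then 2
  else if PySem.Str.isIn "scripts/" f || PySem.Str.isIn "scripts\\" f then 3
  else if PySem.Str.endswith f ".toml" || PySem.Str.endswith f ".yml" ||
          PySem.Str.endswith f ".yaml" || PySem.Str.endswith f ".json" ||
          PySem.Str.endswith f ".cfg" || PySem.Str.endswith f "Dockerfile" then 4
  else if PySem.Str.endswith f ".md" then 5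
  else 6

def generate_changes_list_alt (files : List String) : String :=
  let ordered := (PySem.List.pyRange 0 7 1).flatMap
    (fun k => files.filter (fun f => pvCategory f == k))
  if ordered.isEmpty then "1. (No file changes detected)"
  else PySem.Str.join "\n"
    ((PySem.List.enumerate ordered 1).map
      (fun p => PySem.Int.toStr p.1 ++ ". Modified `" ++ p.2 ++ "`"))

-- ===== PRECONDITION & SPEC =====
def Spec_generate_changes_list (files : List String) (out : String) : Prop := out = generate_changes_list_alt files
instance (files : List String) (out : String) : Decidable (Spec_generate_changes_list files out) := by unfold Spec_generate_changes_list; infer_instance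

-- ===== CLAIM (what is proved, stated in full; the proofs are below) =====
def Claim_equal_generate_changes_list : Prop := ∀ (files : List String), Dom_generate_changes_list files → Spec_generate_changes_list files (generate_changes_list files)

-- ===== LEMMAS AND PROOFS =====

def pvFlt (k : Int) (files : List String) : List String :=
  files.filter (fun f => pvCategory f == k)

theorem pvFlt_cons (k : Int) (f : String) (rest : List String) :
    pvFlt k (f :: rest) = if pvCategory f == k then f :: pvFlt k rest else pvFlt k rest := by
  simp [pvFlt, List.filter_cons]

-- bucket invariant for A's accumulation fold
theorem pvAreas_fold (files : List String) (a : PVAreas) :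
    files.foldl pvAreasStep a =
      ⟨a.modular ++ pvFlt 0 files, a.frontend ++ pvFlt 1 files, a.tests ++ pvFlt 2 files,
       a.scripts ++ pvFlt 3 files, a.config ++ pvFlt 4 files, a.docs ++ pvFlt 5 files,
       a.other ++ pvFlt 6 files⟩ := by
  induction files generalizing a with
  | nil => simp [pvFlt]
  | cons f rest ih =>
    rw [List.foldl_cons, ih]
    simp only [pvFlt_cons]
    unfold pvAreasStep
    by_cases h1 : (PySem.Str.startswith f "src/mind_clone/" || PySem.Str.startswith f "src\\mind_clone\\") = true <;>
    by_cases h2 : (PySem.Str.isIn "mind-clone-ui" f) = true <;>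
    by_cases h3 : (PySem.Str.startswith f "tests/" || PySem.Str.startswith f "tests\\") = true <;>
    by_cases h4 : (PySem.Str.isIn "scripts/" f || PySem.Str.isIn "scripts\\" f) = true <;>
    by_cases h5 : (PySem.Str.endswith f ".toml" || PySem.Str.endswith f ".yml" ||
          PySem.Str.endswith f ".yaml" || PySem.Str.endswith f ".json" ||
          PySem.Str.endswith f ".cfg" || PySem.Str.endswith f "Dockerfile") = true <;>
    by_cases h6 : (PySem.Str.endswith f ".md") = true <;>
      simp only [pvCategory, h1, h2, h3, h4, h5, h6, if_true, if_false, Bool.false_eq_true] <;>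
      simp [List.append_assoc]

def pvFmt (i : Int) (f : String) : String :=
  PySem.Int.toStr i ++ ". Modified `" ++ f ++ "`"

-- A's inner numbering loop is a map over enumerate
theorem pvInner_fold (l : List String) (acc : List String) (n : Int) :
    l.foldl (fun (st : List String × Int) f => (st.1 ++ [pvFmt st.2 f], st.2 + 1)) (acc, n) =
      (acc ++ (PySem.List.enumerate l n).map (fun p => pvFmt p.1 p.2), n + l.length) := by
  induction l generalizing acc n with
  | nil => simp
  | cons x xs ih =>
    simp only [List.foldl_cons, ih, PySem.List.enumerate_cons, List.map_cons, Prod.mk.injEq,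
      List.length_cons]
    constructor
    · simp
    · push_cast; omega

-- A's outer loop over the (area, files) pairs
theorem pvOuter_fold (ps : List (String × List String)) (acc : List String) (n : Int) :
    ps.foldl
      (fun (st : List String × Int) p =>
        p.2.foldl (fun (st : List String × Int) f => (st.1 ++ [pvFmt st.2 f], st.2 + 1)) st)
      (acc, n) =
      (acc ++ (PySem.List.enumerate (ps.map (·.2)).flatten n).map (fun p => pvFmt p.1 p.2),
       n + (ps.map (·.2)).flatten.length) := by
  induction ps generalizing acc n with
  | nil => simp
  | cons p rest ih =>
    simp only [List.foldl_cons, pvInner_fold, ih, List.map_cons, List.flatten_cons,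
      PySem.List.enumerate_append, List.map_append, List.append_assoc, List.length_append,
      Prod.mk.injEq]
    constructor
    · trivial
    · push_cast; omega

-- dropping empty buckets does not change the concatenation
theorem pvFlatten_filter (ps : List (String × List String)) :
    ((ps.filter (fun p => !p.2.isEmpty)).map (·.2)).flatten = (ps.map (·.2)).flatten := by
  induction ps with
  | nil => rfl
  | cons p rest ih =>
    by_cases h : p.2.isEmpty
    · simp [ih, List.isEmpty_iff.mp h]
    · simp [h, ih]

theorem pvOrdered_eq (files : List String) :
    (PySem.List.pyRange 0 7 1).flatMap (fun k => files.filter (fun f => pvCategory f == k)) =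
      ((categorize_files files).map (·.2)).flatten := by
  have hr : PySem.List.pyRange 0 7 1 = [0, 1, 2, 3, 4, 5, 6] := by decide
  unfold categorize_files
  rw [pvFlatten_filter, pvAreas_fold, hr]
  simp [pvFlt]

-- ===== VERDICT (by name: the statement is the Claim_ definition above) =====
theorem generate_changes_list_spec : Claim_equal_generate_changes_list := by
  intro files _
  show generate_changes_list files = generate_changes_list_alt files
  unfold generate_changes_list generate_changes_list_alt
  simp only [pvOrdered_eq]
  have h := pvOuter_fold (categorize_files files) [] 1
  simp only [pvFmt, List.nil_append] at h
  simp only [h]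
  rcases hfl : (List.map (fun x => x.2) (categorize_files files)).flatten with _ | ⟨x, xs⟩
  · simp [hfl]
  · simp [hfl, PySem.List.enumerate_cons]
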